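-- pv_equiv track=rewrite | github.com/shivanichauhan18/Scraping-From-imDB | movie_by_Decades.py | group_by_decade
-- ===== SOURCE A (Python) =====
-- def group_by_decade(years,movie_group_of_year):
--     movies_by_decade={}
--
--     for year in movie_group_of_year:
--         years_list=[]
--         mod=year%10
--         decade_year=year-mod
--         range_year=decade_year+10
--         for j in range(decade_year,range_year):
--             if j in movie_group_of_year:
--                 years_list.extend(years[j])
--         movies_by_decade[decade_year]=years_list
--     return movies_by_decade
-- ===== SOURCE B (Python) =====
-- def group_by_decade(years, movie_group_of_year):
--     buckets = {}
--     for y in sorted(set(movie_group_of_year)):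
--         buckets.setdefault(y - y % 10, []).extend(years[y])
--     return {y - y % 10: buckets[y - y % 10] for y in movie_group_of_year}
-- ===== Notes on version B (the rewrite author's own statement) =====
-- stated objective: faster
-- what changed: A rescans the whole decade range for every year with O(n) list-membership tests and rebuilds each decade's list from scratch; B makes one grouping pass over sorted(set(movie_group_of_year)), extending each decade bucket once, then emits the buckets in A's first-occurrence key order.
import Mathlib
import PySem

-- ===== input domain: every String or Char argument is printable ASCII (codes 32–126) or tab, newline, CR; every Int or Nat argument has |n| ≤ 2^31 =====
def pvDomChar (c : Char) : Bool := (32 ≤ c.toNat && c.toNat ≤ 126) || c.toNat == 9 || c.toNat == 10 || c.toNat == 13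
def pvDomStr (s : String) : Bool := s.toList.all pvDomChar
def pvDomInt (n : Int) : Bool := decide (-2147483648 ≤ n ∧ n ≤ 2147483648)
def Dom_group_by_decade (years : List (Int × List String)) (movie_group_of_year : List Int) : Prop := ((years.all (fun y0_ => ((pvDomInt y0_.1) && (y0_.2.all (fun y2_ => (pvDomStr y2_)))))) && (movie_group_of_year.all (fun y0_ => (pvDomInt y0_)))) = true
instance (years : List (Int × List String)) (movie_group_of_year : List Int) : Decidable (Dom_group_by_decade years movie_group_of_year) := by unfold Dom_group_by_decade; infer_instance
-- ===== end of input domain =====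

-- B replaces A's per-year rescan of every decade (a nested range loop with list-membership
-- tests) by one sorted-set grouping pass into decade buckets; equivalence of the RETURN value.

-- ===== PORT A =====
def group_by_decade (years : List (Int × List String)) (movie_group_of_year : List Int) : List (Int × List String) :=
  let yearsD := PySem.Dict.ofList years
  (movie_group_of_year.foldl (fun d year =>
      let m := PySem.Int.mod year 10
      let decadeYear := year - m
      let rangeYear := decadeYear + 10
      let yearsList := (PySem.List.pyRange decadeYear rangeYear 1).foldl
        (fun acc j => if j ∈ movie_group_of_year then acc ++ yearsD.getD j [] else acc) []
      d.insert decadeYear yearsList)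
    PySem.Dict.empty).items

-- ===== PORT B =====
def group_by_decade_alt (years : List (Int × List String)) (movie_group_of_year : List Int) : List (Int × List String) :=
  let yearsD := PySem.Dict.ofList years
  let buckets := (PySem.List.sorted (PySem.Set.ofList movie_group_of_year) (fun x => x) false).foldl
      (fun d y => d.modify (y - PySem.Int.mod y 10) [] (· ++ yearsD.getD y []))
    PySem.Dict.empty
  (movie_group_of_year.foldl (fun d y =>
      d.insert (y - PySem.Int.mod y 10) (buckets.getD (y - PySem.Int.mod y 10) []))
    PySem.Dict.empty).items

-- ===== PRECONDITION & SPEC =====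
-- Pre_ excludes exactly the inputs where Python A raises KeyError: a year listed in
-- movie_group_of_year that is not a key of the years dict.
def Pre_group_by_decade (years : List (Int × List String)) (movie_group_of_year : List Int) : Prop :=
  ∀ y ∈ movie_group_of_year, y ∈ years.map Prod.fst
instance (years : List (Int × List String)) (movie_group_of_year : List Int) : Decidable (Pre_group_by_decade years movie_group_of_year) := by unfold Pre_group_by_decade; infer_instance
def pvWitness_group_by_decade : (List (Int × List String)) × List Int :=
  ([(1994, ["Pulp Fiction"]), (2001, ["Amelie"]), (1999, ["Matrix"])], [1994, 2001, 1999])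

def Spec_group_by_decade (years : List (Int × List String)) (movie_group_of_year : List Int) (out : List (Int × List String)) : Prop := out = group_by_decade_alt years movie_group_of_year
instance (years : List (Int × List String)) (movie_group_of_year : List Int) (out : List (Int × List String)) : Decidable (Spec_group_by_decade years movie_group_of_year out) := by unfold Spec_group_by_decade; infer_instance

-- ===== CLAIM (what is proved, stated in full; the proofs are below) =====
def Claim_equal_group_by_decade : Prop := ∀ (years : List (Int × List String)) (movie_group_of_year : List Int), Dom_group_by_decade years movie_group_of_year → Pre_group_by_decade years movie_group_of_year → Spec_group_by_decade years movie_group_of_year (group_by_decade years movie_group_of_year)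

-- ===== LEMMAS AND PROOFS =====

-- B's grouping pass, characterized: the bucket stored at key k collects, in order,
-- the movie lists of exactly the years of s whose decade is k.
theorem bucket_getD (G : Int → List String) (dec : Int → Int) (s : List Int) (d : PySem.Dict Int (List String)) (k : Int) :
    ((s.foldl (fun d y => d.modify (dec y) [] (· ++ G y)) d).getD k [])
      = d.getD k [] ++ (s.filter (fun y => decide (dec y = k))).flatMap G := by
  induction s generalizing d with
  | nil => simp
  | cons y s ih =>
    simp only [List.foldl_cons, List.filter_cons]
    rw [ih, PySem.Dict.getD_modify]
    by_cases h : dec y = k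
    · rw [if_pos h.symm, if_pos (by simpa using h), h, List.flatMap_cons, List.append_assoc]
    · rw [if_neg (fun hh => h hh.symm), if_neg (by simpa using h)]

-- two strictly increasing lists with the same members are equal
theorem eq_of_pairwise_lt_of_mem_iff (l1 l2 : List Int)
    (h1 : l1.Pairwise (· < ·)) (h2 : l2.Pairwise (· < ·))
    (hm : ∀ x, x ∈ l1 ↔ x ∈ l2) : l1 = l2 := by
  have nd1 : l1.Nodup := h1.imp (fun h => ne_of_lt h)
  have nd2 : l2.Nodup := h2.imp (fun h => ne_of_lt h)
  exact List.Perm.eq_of_pairwise (fun a b _ _ hab hba => absurd hab (not_lt.2 hba.le))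
    h1 h2 ((List.perm_ext_iff_of_nodup nd1 nd2).2 hm)

-- the crux: the decade-k slice of sorted(set(mg)) is the membership-filtered range of decade k
theorem filter_sorted_set_eq_filter_range (mg : List Int) (k : Int) (hk : (10:Int) ∣ k) :
    ((PySem.List.sorted (PySem.Set.ofList mg) (fun x => x) false).filter
        (fun y => decide (y - PySem.Int.mod y 10 = k)))
      = (PySem.List.pyRange k (k + 10) 1).filter (fun j => decide (j ∈ mg)) := by
  apply eq_of_pairwise_lt_of_mem_iff
  · exact (PySem.List.sorted_ofList_pairwise_lt mg).filter _
  · exact (PySem.List.pairwise_lt_pyRange_one k (k + 10)).filter _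
  · intro x
    simp only [List.mem_filter, PySem.List.mem_sorted, PySem.Set.mem_ofList,
      PySem.List.mem_pyRange_one, decide_eq_true_eq,
      PySem.Int.mod_eq_emod_of_pos (a := x) (by norm_num : (0:Int) < 10)]
    constructor
    · rintro ⟨hx, he⟩; exact ⟨⟨by omega, by omega⟩, hx⟩
    · rintro ⟨⟨h1, h2⟩, hx⟩; exact ⟨hx, by omega⟩

-- A's inner loop value equals B's bucket at the same decade
theorem inner_eq_bucket (years : List (Int × List String)) (mg : List Int) (y : Int) :
    ((PySem.List.pyRange (y - PySem.Int.mod y 10) (y - PySem.Int.mod y 10 + 10) 1).foldl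
        (fun acc j => if j ∈ mg then acc ++ (PySem.Dict.ofList years).getD j [] else acc) [])
      = ((PySem.List.sorted (PySem.Set.ofList mg) (fun x => x) false).foldl
          (fun d y => d.modify (y - PySem.Int.mod y 10) [] (· ++ (PySem.Dict.ofList years).getD y []))
          PySem.Dict.empty).getD (y - PySem.Int.mod y 10) [] := by
  rw [bucket_getD _ (fun y => y - PySem.Int.mod y 10), PySem.List.foldl_ite_eq_foldl_filter, PySem.List.foldl_append_eq_flatMap]
  rw [filter_sorted_set_eq_filter_range mg (y - PySem.Int.mod y 10)
    (by rw [PySem.Int.mod_eq_emod_of_pos (by norm_num : (0:Int) < 10)]; omega)]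
  simp

-- ===== VERDICT (by name: the statement is the Claim_ definition above) =====
theorem group_by_decade_spec : Claim_equal_group_by_decade := by
  intro years mg _ _
  unfold Spec_group_by_decade group_by_decade group_by_decade_alt
  simp only []
  congr 1
  apply PySem.List.foldl_congr_mem
  intro d y hy
  rw [inner_eq_bucket years mg y]
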